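-- pv_equiv track=rewrite | github.com/CloakedLeader/comic_library | metadata_inserter.py | creators_parsing
-- ===== SOURCE A (Python) =====
-- def creators_parsing(creators: list[tuple[str, str]]) -> dict[str, str]:
--     mapping_ = {
--         "penciler": "Penciller",
--         "writer": "Writer",
--         "inker": "Inker",
--         "editor": "Editor",
--         "letterer": "Letterer",
--         "cover": "CoverArtist",
--         "colorist": "Colorist",
--         "artist": "Penciller",
--     }
--     dummy_creator_dict: dict[str, list[str]] = {
--         "Penciller": [],
--         "Writer": [],
--         "Inker": [],
--         "Editor": [],
--         "Letterer": [],
--         "CoverArtist": [],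
--         "Colorist": [],
--     }
--     creator_dict: dict[str, str] = {}
--
--     for person, role in creators:
--         if role is None:
--             continue
--         roles = [r.strip() for r in role.split(",")]
--         for role in roles:
--             if role in dummy_creator_dict.keys():
--                 dummy_creator_dict[role].append(person)
--             elif role in mapping_.keys():
--                 role_real = mapping_[role]
--                 dummy_creator_dict[role_real].append(person)
--
--     for title, names in dummy_creator_dict.items():
--         creator_dict[title] = ", ".join(names)
--
--     return creator_dict
-- ===== SOURCE B (Python) =====
-- _TITLES = ["Penciller", "Writer", "Inker", "Editor", "Letterer", "CoverArtist", "Colorist"]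
-- _ALIASES = {
--     "penciler": "Penciller", "writer": "Writer", "inker": "Inker",
--     "editor": "Editor", "letterer": "Letterer", "cover": "CoverArtist",
--     "colorist": "Colorist", "artist": "Penciller",
-- }
--
--
-- def _canonical(raw):
--     role = raw.strip()
--     if role in _TITLES:
--         return role
--     return _ALIASES.get(role)
--
--
-- def creators_parsing(creators):
--     expanded = []
--     for person, role in creators:
--         if role is None:
--             continue
--         for raw in role.split(","):
--             canon = _canonical(raw)
--             if canon is not None:
--                 expanded.append((person, canon))
--     return {t: ", ".join(p for p, r in expanded if r == t) for t in _TITLES}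
-- ===== Notes on version B (the rewrite author's own statement) =====
-- stated objective: alternative
-- what changed: A scatters each person into per-title bucket lists inside one dict as it scans; B first flattens the input into one list of (person, canonical_title) pairs and then builds each of the seven outputs by filtering that flat list per title.
import Mathlib
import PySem

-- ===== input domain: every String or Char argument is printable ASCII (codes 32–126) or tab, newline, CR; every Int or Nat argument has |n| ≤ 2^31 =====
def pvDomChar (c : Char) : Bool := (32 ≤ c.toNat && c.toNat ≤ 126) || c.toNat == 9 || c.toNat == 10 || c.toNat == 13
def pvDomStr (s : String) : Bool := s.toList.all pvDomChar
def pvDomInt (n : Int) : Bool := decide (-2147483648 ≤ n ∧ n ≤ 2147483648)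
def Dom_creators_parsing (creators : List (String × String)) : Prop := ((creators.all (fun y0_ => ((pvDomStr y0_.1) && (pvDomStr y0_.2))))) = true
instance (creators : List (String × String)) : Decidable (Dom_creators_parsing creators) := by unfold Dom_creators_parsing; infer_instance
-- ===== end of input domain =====

-- B replaces A's scatter-into-buckets dict pass by a flat normalize pass (person, canonical-title pairs)
-- followed by a per-title filter-and-join; alternative decomposition, same asymptotic cost.

-- ===== PORT A =====
def pvMappingA : PySem.Dict String String :=
  PySem.Dict.ofList [("penciler","Penciller"),("writer","Writer"),("inker","Inker"),
    ("editor","Editor"),("letterer","Letterer"),("cover","CoverArtist"),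
    ("colorist","Colorist"),("artist","Penciller")]

def pvDummyA : PySem.Dict String (List String) :=
  PySem.Dict.ofList [("Penciller",[]),("Writer",[]),("Inker",[]),("Editor",[]),
    ("Letterer",[]),("CoverArtist",[]),("Colorist",[])]

def creators_parsing (creators : List (String × String)) : List (String × String) :=
  let dummy := creators.foldl (fun d pr =>
    let roles := (((PySem.Str.split? pr.2 ",").getD [])).map PySem.Str.strip
    roles.foldl (fun d role =>
      if d.contains role then
        d.modify role [] (fun xs => xs ++ [pr.1])
      else if pvMappingA.contains role then
        d.modify (pvMappingA.getD role "") [] (fun xs => xs ++ [pr.1])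
      else d) d) pvDummyA
  (dummy.items.foldl (fun cd p => cd.insert p.1 (PySem.Str.join ", " p.2))
      PySem.Dict.empty).items

-- ===== PORT B =====
def pvTitlesB : List String :=
  ["Penciller","Writer","Inker","Editor","Letterer","CoverArtist","Colorist"]

def pvAliasesB : PySem.Dict String String :=
  PySem.Dict.ofList [("penciler","Penciller"),("writer","Writer"),("inker","Inker"),
    ("editor","Editor"),("letterer","Letterer"),("cover","CoverArtist"),
    ("colorist","Colorist"),("artist","Penciller")]

def pvCanonicalB (raw : String) : Option String :=
  let role := PySem.Str.strip raw
  if role ∈ pvTitlesB then some role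
  else pvAliasesB.get? role

def creators_parsing_alt (creators : List (String × String)) : List (String × String) :=
  let expanded := creators.foldl (fun acc pr =>
    (((PySem.Str.split? pr.2 ",").getD [])).foldl (fun acc raw =>
      match pvCanonicalB raw with
      | some c => acc ++ [(pr.1, c)]
      | none => acc) acc) []
  pvTitlesB.map (fun t =>
    (t, PySem.Str.join ", " ((expanded.filter (fun pc => pc.2 == t)).map (·.1))))

-- ===== PRECONDITION & SPEC =====
def Spec_creators_parsing (creators : List (String × String)) (out : List (String × String)) : Prop := out = creators_parsing_alt creators
instance (creators : List (String × String)) (out : List (String × String)) : Decidable (Spec_creators_parsing creators out) := by unfold Spec_creators_parsing; infer_instance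

-- ===== CLAIM (what is proved, stated in full; the proofs are below) =====
def Claim_equal_creators_parsing : Prop := ∀ (creators : List (String × String)), Dom_creators_parsing creators → Spec_creators_parsing creators (creators_parsing creators)

-- ===== LEMMAS AND PROOFS =====

-- canonicalisation of an already-stripped role (pvCanonicalB = pvCanon ∘ strip)
def pvCanon (role : String) : Option String :=
  if role ∈ pvTitlesB then some role else pvAliasesB.get? role

-- the (person, title) pairs contributed by one stripped role / one raw role
def pvPairC (person role : String) : List (String × String) :=
  match pvCanon role with
  | some c => [(person, c)]
  | none => []

def pvPair (person raw : String) : List (String × String) :=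
  pvPairC person (PySem.Str.strip raw)

-- pvCanonicalB raw is pvCanon (strip raw) definitionally
lemma pvPair_eq (person raw : String) :
    pvPair person raw =
      (match pvCanonicalB raw with
        | some c => [(person, c)]
        | none => ([] : List (String × String))) := rfl

-- the pure value B's expansion pass computes
def pvExpand1 (person role : String) : List (String × String) :=
  (((PySem.Str.split? role ",").getD [])).flatMap (pvPair person)

def pvExpandAll (creators : List (String × String)) : List (String × String) :=
  creators.flatMap (fun pr => pvExpand1 pr.1 pr.2)

-- A's single-role step (on the already-stripped role)
def pvStepA (person : String) (d : PySem.Dict String (List String)) (role : String) :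
    PySem.Dict String (List String) :=
  if d.contains role then
    d.modify role [] (fun xs => xs ++ [person])
  else if pvMappingA.contains role then
    d.modify (pvMappingA.getD role "") [] (fun xs => xs ++ [person])
  else d

lemma pvInnerB_shift (person : String) (rs : List String) :
    ∀ (acc : List (String × String)),
      rs.foldl (fun acc raw =>
        match pvCanonicalB raw with
        | some c => acc ++ [(person, c)]
        | none => acc) acc = acc ++ rs.flatMap (pvPair person) := by
  induction rs with
  | nil => intro acc; simp
  | cons r rs ih =>
      intro acc
      rw [List.foldl_cons, List.flatMap_cons, pvPair_eq]
      cases pvCanonicalB r <;> simp [ih, List.append_assoc]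

lemma pvOuterB_shift (l : List (String × String)) :
    ∀ (acc : List (String × String)),
      l.foldl (fun acc pr =>
        (((PySem.Str.split? pr.2 ",").getD [])).foldl (fun acc raw =>
          match pvCanonicalB raw with
          | some c => acc ++ [(pr.1, c)]
          | none => acc) acc) acc = acc ++ pvExpandAll l := by
  induction l with
  | nil => intro acc; simp [pvExpandAll]
  | cons pr l ih =>
      intro acc
      rw [List.foldl_cons, pvInnerB_shift, ih]
      simp [pvExpandAll, pvExpand1, List.flatMap_cons, List.append_assoc]

lemma pvMappingA_values (role rr : String) (h : pvMappingA.get? role = some rr) :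
    rr ∈ pvTitlesB := by
  have hm := PySem.Dict.mem_items_of_get?_eq_some _ h
  have hi : pvMappingA.items = [("penciler","Penciller"),("writer","Writer"),("inker","Inker"),
      ("editor","Editor"),("letterer","Letterer"),("cover","CoverArtist"),
      ("colorist","Colorist"),("artist","Penciller")] := by decide
  rw [hi] at hm
  simp only [List.mem_cons, List.not_mem_nil, or_false, Prod.mk.injEq] at hm
  rcases hm with ⟨_, rfl⟩|⟨_, rfl⟩|⟨_, rfl⟩|⟨_, rfl⟩|⟨_, rfl⟩|⟨_, rfl⟩|⟨_, rfl⟩|⟨_, rfl⟩ <;> decide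

lemma pvStepA_keys (person role : String) (d : PySem.Dict String (List String))
    (h : d.keys = pvTitlesB) : (pvStepA person d role).keys = pvTitlesB := by
  unfold pvStepA
  split_ifs with h1 h2
  · rw [PySem.Dict.keys_modify, PySem.Dict.keys_insert_of_contains _ _ h1, h]
  · have hMA : ∃ rr, pvMappingA.get? role = some rr := by
      rw [PySem.Dict.contains_eq_isSome_get?] at h2
      exact Option.isSome_iff_exists.mp h2
    obtain ⟨rr, hMA⟩ := hMA
    have hgd : pvMappingA.getD role "" = rr := by
      rw [PySem.Dict.getD_eq_get?_getD, hMA]; rfl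
    have hc : d.contains rr = true := by
      rw [PySem.Dict.contains_eq_decide_mem_keys, h]
      exact decide_eq_true (pvMappingA_values role rr hMA)
    rw [hgd, PySem.Dict.keys_modify, PySem.Dict.keys_insert_of_contains _ _ hc, h]
  · exact h

lemma pvStepA_getD (person role t : String) (d : PySem.Dict String (List String))
    (h : d.keys = pvTitlesB) :
    (pvStepA person d role).getD t [] =
      d.getD t [] ++ ((pvPairC person role).filter (fun pc => pc.2 == t)).map (·.1) := by
  have hcont : d.contains role = decide (role ∈ pvTitlesB) := by
    rw [PySem.Dict.contains_eq_decide_mem_keys, h]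
  unfold pvStepA pvPairC pvCanon
  by_cases hm : role ∈ pvTitlesB
  · rw [hcont]
    simp only [hm, decide_true, if_true]
    rw [PySem.Dict.getD_modify]
    by_cases ht : t = role
    · subst ht; simp
    · rw [if_neg ht]
      simp [show (role == t) = false from beq_eq_false_iff_ne.mpr (fun hh => ht hh.symm)]
  · rw [hcont]
    simp only [hm, decide_false, Bool.false_eq_true, if_false]
    cases hg : pvAliasesB.get? role with
    | none =>
        have hc : pvMappingA.contains role = false := by
          rw [PySem.Dict.contains_eq_isSome_get?]
          have he : pvMappingA = pvAliasesB := rfl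
          rw [he, hg]; rfl
        simp [hc]
    | some rr =>
        have hMA : pvMappingA.get? role = some rr := hg
        have hc : pvMappingA.contains role = true := by
          rw [PySem.Dict.contains_eq_isSome_get?, hMA]; rfl
        have hgd : pvMappingA.getD role "" = rr := by
          rw [PySem.Dict.getD_eq_get?_getD, hMA]; rfl
        simp only [hc, if_true, hgd]
        rw [PySem.Dict.getD_modify]
        by_cases ht : t = rr
        · subst ht; simp
        · rw [if_neg ht]
          simp [show (rr == t) = false from beq_eq_false_iff_ne.mpr (fun hh => ht hh.symm)]

lemma pvRolesA (person : String) (rs : List String) :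
    ∀ (d : PySem.Dict String (List String)), d.keys = pvTitlesB →
      (rs.foldl (fun d raw => pvStepA person d (PySem.Str.strip raw)) d).keys = pvTitlesB ∧
      ∀ t, (rs.foldl (fun d raw => pvStepA person d (PySem.Str.strip raw)) d).getD t [] =
        d.getD t [] ++ ((rs.flatMap (pvPair person)).filter (fun pc => pc.2 == t)).map (·.1) := by
  induction rs with
  | nil => intro d h; exact ⟨h, by simp⟩
  | cons r rs ih =>
      intro d h
      have hk := pvStepA_keys person (PySem.Str.strip r) d h
      obtain ⟨ihk, ihg⟩ := ih _ hk
      refine ⟨by simpa using ihk, fun t => ?_⟩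
      simp only [List.foldl_cons] at ihg ⊢
      rw [ihg t, pvStepA_getD person _ t d h]
      simp only [List.flatMap_cons, List.filter_append, List.map_append, List.append_assoc,
        pvPair]

lemma pvLoopA (l : List (String × String)) :
    ∀ (d : PySem.Dict String (List String)), d.keys = pvTitlesB →
      (l.foldl (fun d pr =>
        ((((PySem.Str.split? pr.2 ",").getD [])).map PySem.Str.strip).foldl (fun d role =>
          if d.contains role then d.modify role [] (fun xs => xs ++ [pr.1])
          else if pvMappingA.contains role then
            d.modify (pvMappingA.getD role "") [] (fun xs => xs ++ [pr.1])
          else d) d) d).keys = pvTitlesB ∧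
      ∀ t, (l.foldl (fun d pr =>
        ((((PySem.Str.split? pr.2 ",").getD [])).map PySem.Str.strip).foldl (fun d role =>
          if d.contains role then d.modify role [] (fun xs => xs ++ [pr.1])
          else if pvMappingA.contains role then
            d.modify (pvMappingA.getD role "") [] (fun xs => xs ++ [pr.1])
          else d) d) d).getD t [] =
        d.getD t [] ++ ((pvExpandAll l).filter (fun pc => pc.2 == t)).map (·.1) := by
  induction l with
  | nil => intro d h; exact ⟨h, by simp [pvExpandAll]⟩
  | cons pr l ih =>
      intro d h
      have hstep : ((((PySem.Str.split? pr.2 ",").getD [])).map PySem.Str.strip).foldl (fun d role =>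
          if d.contains role then d.modify role [] (fun xs => xs ++ [pr.1])
          else if pvMappingA.contains role then
            d.modify (pvMappingA.getD role "") [] (fun xs => xs ++ [pr.1])
          else d) d =
          (((PySem.Str.split? pr.2 ",").getD [])).foldl
            (fun d raw => pvStepA pr.1 d (PySem.Str.strip raw)) d := by
        rw [List.foldl_map]; rfl
      obtain ⟨hk1, hg1⟩ := pvRolesA pr.1 (((PySem.Str.split? pr.2 ",").getD [])) d h
      rw [← hstep] at hk1 hg1
      obtain ⟨ihk, ihg⟩ := ih _ hk1
      refine ⟨by simpa using ihk, fun t => ?_⟩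
      simp only [List.foldl_cons] at ihg ⊢
      rw [ihg t, hg1 t]
      simp only [pvExpandAll, List.flatMap_cons, pvExpand1, List.filter_append,
        List.map_append, List.append_assoc]

lemma pvDummy_getD (t : String) : pvDummyA.getD t [] = [] := by
  cases hq : pvDummyA.get? t with
  | none => rw [PySem.Dict.getD_eq_get?_getD, hq]; rfl
  | some v =>
      have hm := PySem.Dict.mem_items_of_get?_eq_some _ hq
      have hi : pvDummyA.items = [("Penciller",[]),("Writer",[]),("Inker",[]),("Editor",[]),
          ("Letterer",[]),("CoverArtist",[]),("Colorist",[])] := by decide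
      rw [hi] at hm
      simp only [List.mem_cons, List.not_mem_nil, or_false, Prod.mk.injEq] at hm
      have hv : v = [] := by
        rcases hm with ⟨_, h2⟩|⟨_, h2⟩|⟨_, h2⟩|⟨_, h2⟩|⟨_, h2⟩|⟨_, h2⟩|⟨_, h2⟩ <;> exact h2
      rw [PySem.Dict.getD_eq_get?_getD, hq, hv]; rfl

-- A's closing loop: inserting the seven (distinct-key) items into an empty dict just maps them
lemma pvFinal_items (l : List (String × List String)) (hnd : (l.map (·.1)).Nodup) :
    (l.foldl (fun cd p => cd.insert p.1 (PySem.Str.join ", " p.2))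
        (PySem.Dict.empty : PySem.Dict String String)).items
      = l.map (fun p => (p.1, PySem.Str.join ", " p.2)) := by
  have h := PySem.Dict.items_foldl_insert_fresh l (fun p => p.1)
    (fun p => PySem.Str.join ", " p.2) PySem.Dict.empty
    (fun a _ => by rfl) hnd
  simpa using h

-- ===== VERDICT (by name: the statement is the Claim_ definition above) =====
theorem creators_parsing_spec : Claim_equal_creators_parsing := by
  intro creators _
  unfold Spec_creators_parsing creators_parsing creators_parsing_alt
  dsimp only
  rw [pvOuterB_shift, List.nil_append]
  obtain ⟨hk, hg⟩ := pvLoopA creators pvDummyA (by decide)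
  set D := creators.foldl (fun d pr =>
      (((PySem.Str.split? pr.2 ",").getD []).map PySem.Str.strip).foldl (fun d role =>
        if d.contains role then d.modify role [] (fun xs => xs ++ [pr.1])
        else if pvMappingA.contains role then
          d.modify (pvMappingA.getD role "") [] (fun xs => xs ++ [pr.1])
        else d) d) pvDummyA with hD
  have hnd : D.keys.Nodup := by rw [hk]; decide
  have hitems : D.items = D.keys.map (fun k => (k, D.getD k [])) :=
    PySem.Dict.items_eq_map_keys D hnd []
  rw [hk] at hitems
  have hndk : (D.items.map (·.1)).Nodup := by
    rw [hitems, List.map_map]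
    have hcmp : ((fun (p : String × List String) => p.1) ∘ fun k => (k, D.getD k [])) =
        fun k => k := rfl
    rw [hcmp]
    simpa using (show pvTitlesB.Nodup by decide)
  rw [pvFinal_items D.items hndk, hitems, List.map_map]
  refine List.map_congr_left (fun t _ => ?_)
  simp only [Function.comp]
  rw [hg t, pvDummy_getD, List.nil_append]
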